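-- pv_equiv track=rewrite | github.com/andrade-filipe/pdf_to_markdown | converter/steps/selective_ocr_step.py | _combine_section
-- ===== SOURCE A (Python) =====
-- def _combine_section(normal_section: str, ocr_section: str) -> str:
--     """Combina duas seções de forma inteligente"""
--     normal_lines = [l.strip() for l in normal_section.split('\n') if l.strip()]
--     ocr_lines = [l.strip() for l in ocr_section.split('\n') if l.strip()]
--
--     # Juntar linhas únicas de ambas as fontes
--     all_lines = []
--     seen_lines = set()
--
--     # Alternar entre fontes para manter ordem natural
--     max_lines = max(len(normal_lines), len(ocr_lines))
--
--     for i in range(max_lines):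
--         if i < len(normal_lines):
--             line = normal_lines[i]
--             normalized = line.lower()
--             if normalized not in seen_lines and len(line) > 10:
--                 all_lines.append(line)
--                 seen_lines.add(normalized)
--
--         if i < len(ocr_lines):
--             line = ocr_lines[i]
--             normalized = line.lower()
--             if normalized not in seen_lines and len(line) > 10:
--                 all_lines.append(line)
--                 seen_lines.add(normalized)
--
--     return '\n'.join(all_lines)
-- ===== SOURCE B (Python) =====
-- def _combine_section(normal_section: str, ocr_section: str) -> str:
--     """Different algorithm: tag every usable line with a numeric rank (even ranks
--     for the normal section, odd for OCR), sort the combined tagged list by rank,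
--     then deduplicate in one pass."""
--     keyed = []
--     for offset, section in ((0, normal_section), (1, ocr_section)):
--         i = 0
--         for raw in section.split('\n'):
--             line = raw.strip()
--             if line:
--                 if len(line) > 10:
--                     keyed.append((2 * i + offset, line))
--                 i += 1
--     keyed.sort(key=lambda t: t[0])
--     result = []
--     seen = set()
--     for _, line in keyed:
--         low = line.lower()
--         if low not in seen:
--             result.append(line)
--             seen.add(low)
--     return '\n'.join(result)
-- ===== Notes on version B (the rewrite author's own statement) =====
-- stated objective: alternative
-- what changed: Instead of an indexed interleaving loop, B tags every long-enough line with a numeric rank (even ranks for the normal section, odd for OCR), sorts the concatenated tagged list by rank, and deduplicates the sorted sequence in one pass.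
import Mathlib
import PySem

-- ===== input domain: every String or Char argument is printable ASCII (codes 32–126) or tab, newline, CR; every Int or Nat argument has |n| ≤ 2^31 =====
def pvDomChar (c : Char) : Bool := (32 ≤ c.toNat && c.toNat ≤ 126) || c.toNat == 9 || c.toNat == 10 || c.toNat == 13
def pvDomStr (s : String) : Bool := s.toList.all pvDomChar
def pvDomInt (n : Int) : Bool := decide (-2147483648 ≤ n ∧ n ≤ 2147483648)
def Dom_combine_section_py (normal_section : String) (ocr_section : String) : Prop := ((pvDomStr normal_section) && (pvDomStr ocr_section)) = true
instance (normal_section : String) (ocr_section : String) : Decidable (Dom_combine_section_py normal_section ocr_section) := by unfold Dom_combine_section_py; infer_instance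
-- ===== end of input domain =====

-- B replaces A's indexed interleaving loop by a tag-sort-dedup pipeline: every usable line gets a
-- numeric rank (even for normal, odd for OCR), the tagged lists are concatenated, sorted by rank,
-- and deduplicated in one pass (alternative algorithm, same result).

-- ===== PORT A =====
-- [l.strip() for l in s.split('\n')] with the 'if l.strip()' filter: the condition depends only
-- on the stripped line, so map-strip-then-filter-nonempty is the same comprehension.
-- s.split('\n'): the separator is the nonempty literal "\n", so split? is always some; getD [] is exact.
def pvStripLinesA (s : String) : List String :=
  (((PySem.Str.split? s "\n").getD []).map PySem.Str.strip).filter (fun l => l ≠ "")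

def combine_section_py (normal_section : String) (ocr_section : String) : String :=
  let normal_lines := pvStripLinesA normal_section
  let ocr_lines := pvStripLinesA ocr_section
  let max_lines : Int := max (normal_lines.length : Int) (ocr_lines.length : Int)
  let st :=
    (PySem.List.pyRange 0 max_lines 1).foldl
      (fun (st : List String × PySem.Set String) i =>
        let st :=
          if i < (normal_lines.length : Int) then
            let line := PySem.List.pyGetD normal_lines i ""
            let normalized := PySem.Str.lower line
            if ¬ PySem.Set.contains st.2 normalized ∧ PySem.Str.len line > 10 then
              (st.1 ++ [line], PySem.Set.add st.2 normalized)
            else st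
          else st
        if i < (ocr_lines.length : Int) then
          let line := PySem.List.pyGetD ocr_lines i ""
          let normalized := PySem.Str.lower line
          if ¬ PySem.Set.contains st.2 normalized ∧ PySem.Str.len line > 10 then
            (st.1 ++ [line], PySem.Set.add st.2 normalized)
          else st
        else st)
      ([], PySem.Set.empty)
  PySem.Str.join "\n" st.1

-- ===== PORT B =====
-- Source B's inner building loop for one section: fold over s.split('\n') with the running counter i
-- (incremented on every non-blank stripped line) and the accumulated keyed list; split? note as above.
def pvBuildStep (offset : Int) (st : Int × List (Int × String)) (raw : String) :
    Int × List (Int × String) :=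
  let line := PySem.Str.strip raw
  if line ≠ "" then
    (st.1 + 1,
     if PySem.Str.len line > 10 then st.2 ++ [(2 * st.1 + offset, line)] else st.2)
  else st

def pvBuildKeyed (offset : Int) (s : String) : List (Int × String) :=
  (((PySem.Str.split? s "\n").getD []).foldl (pvBuildStep offset) (0, [])).2

def combine_section_py_alt (normal_section : String) (ocr_section : String) : String :=
  let keyed := pvBuildKeyed 0 normal_section ++ pvBuildKeyed 1 ocr_section
  -- keyed.sort(key=lambda t: t[0]): Python's stable sort by the rank
  let keyed := PySem.List.sorted keyed (fun t => t.1) false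
  let st :=
    keyed.foldl
      (fun (st : List String × PySem.Set String) t =>
        let line := t.2
        let low := PySem.Str.lower line
        if ¬ PySem.Set.contains st.2 low then
          (st.1 ++ [line], PySem.Set.add st.2 low)
        else st)
      ([], PySem.Set.empty)
  PySem.Str.join "\n" st.1

-- ===== PRECONDITION & SPEC =====
def Spec_combine_section_py (normal_section : String) (ocr_section : String) (out : String) : Prop := out = combine_section_py_alt normal_section ocr_section
instance (normal_section : String) (ocr_section : String) (out : String) : Decidable (Spec_combine_section_py normal_section ocr_section out) := by unfold Spec_combine_section_py; infer_instance

-- ===== CLAIM (what is proved, stated in full; the proofs are below) =====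
def Claim_equal_combine_section_py : Prop := ∀ (normal_section : String) (ocr_section : String), Dom_combine_section_py normal_section ocr_section → Spec_combine_section_py normal_section ocr_section (combine_section_py normal_section ocr_section)

-- ===== LEMMAS AND PROOFS =====

-- the dedup step A's loop performs on one line
def pvStep (st : List String × PySem.Set String) (line : String) : List String × PySem.Set String :=
  if ¬ PySem.Set.contains st.2 (PySem.Str.lower line) ∧ PySem.Str.len line > 10 then
    (st.1 ++ [line], PySem.Set.add st.2 (PySem.Str.lower line))
  else st

-- B's dedup step (the length test already happened at build time)
def pvSeen (st : List String × PySem.Set String) (line : String) : List String × PySem.Set String :=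
  if ¬ PySem.Set.contains st.2 (PySem.Str.lower line) then
    (st.1 ++ [line], PySem.Set.add st.2 (PySem.Str.lower line))
  else st

-- A's range loop, named so the proof can talk about it
def pvLoopA (ns os : List String) (st : List String × PySem.Set String) :
    List String × PySem.Set String :=
  (PySem.List.pyRange 0 (max (ns.length : Int) (os.length : Int)) 1).foldl
    (fun (st : List String × PySem.Set String) i =>
      let st := if i < (ns.length : Int) then pvStep st (PySem.List.pyGetD ns i "") else st
      if i < (os.length : Int) then pvStep st (PySem.List.pyGetD os i "") else st) st

-- A's loop body with the range index already turned into a Nat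
def pvBodyN (ns os : List String) (st : List String × PySem.Set String) (k : Nat) :
    List String × PySem.Set String :=
  let st := if k < ns.length then pvStep st (ns.getD k "") else st
  if k < os.length then pvStep st (os.getD k "") else st

-- the interleaved line sequence A consumes
def pvFlat : List String → List String → List String
  | [], bs => bs
  | a :: as, [] => a :: pvFlat as []
  | a :: as, b :: bs => a :: b :: pvFlat as bs

-- what one section's keyed build produces, as a function of its clean lines (counter i)
def pvTagFrom (offset i : Int) : List String → List (Int × String)
  | [] => []
  | x :: xs =>
      (if PySem.Str.len x > 10 then [(2 * i + offset, x)] else []) ++ pvTagFrom offset (i + 1) xs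

-- the sorted order of the two tagged lists: the interleaving, keys strictly increasing
def pvInter : List String → List String → Int → List (Int × String)
  | [], [], _ => []
  | [], b :: bs, i =>
      (if PySem.Str.len b > 10 then [(2 * i + 1, b)] else []) ++ pvInter [] bs (i + 1)
  | a :: as, [], i =>
      (if PySem.Str.len a > 10 then [(2 * i, a)] else []) ++ pvInter as [] (i + 1)
  | a :: as, b :: bs, i =>
      (if PySem.Str.len a > 10 then [(2 * i, a)] else []) ++
      (if PySem.Str.len b > 10 then [(2 * i + 1, b)] else []) ++ pvInter as bs (i + 1)

theorem pvBodyN_shift (a b : String) (ns os : List String) :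
    (fun st k => pvBodyN (a :: ns) (b :: os) st (k + 1)) = pvBodyN ns os := by
  funext st k; simp [pvBodyN]

theorem pvBodyN_shift_left (b : String) (os : List String) :
    (fun st k => pvBodyN [] (b :: os) st (k + 1)) = pvBodyN [] os := by
  funext st k; simp [pvBodyN]

theorem pvBodyN_shift_right (a : String) (ns : List String) :
    (fun st k => pvBodyN (a :: ns) [] st (k + 1)) = pvBodyN ns [] := by
  funext st k; simp [pvBodyN]

theorem pvKey (ns os : List String) (st : List String × PySem.Set String) :
    (List.range (max ns.length os.length)).foldl (pvBodyN ns os) st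
      = (pvFlat ns os).foldl pvStep st := by
  induction ns generalizing os st with
  | nil =>
    induction os generalizing st with
    | nil => simp [pvFlat]
    | cons b bs ih =>
      rw [show max (List.length ([] : List String)) (b :: bs).length = bs.length + 1 by
          simp only [List.length_nil, List.length_cons]; omega,
        List.range_succ_eq_map, List.foldl_cons, List.foldl_map, pvBodyN_shift_left]
      have h0 : pvBodyN [] (b :: bs) st 0 = pvStep st b := by simp [pvBodyN]
      rw [h0]
      have := ih (pvStep st b)
      simp only [List.length_nil, Nat.zero_max] at this
      rw [this]
      simp [pvFlat]
  | cons a as ihn =>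
    cases os with
    | nil =>
      rw [show max (a :: as).length (List.length ([] : List String)) = as.length + 1 by
          simp only [List.length_nil, List.length_cons]; omega,
        List.range_succ_eq_map, List.foldl_cons, List.foldl_map, pvBodyN_shift_right]
      have h0 : pvBodyN (a :: as) [] st 0 = pvStep st a := by simp [pvBodyN]
      rw [h0]
      have := ihn [] (pvStep st a)
      simp only [List.length_nil, Nat.max_zero] at this
      rw [this]
      simp [pvFlat]
    | cons b bs =>
      rw [show max (a :: as).length (b :: bs).length = max as.length bs.length + 1 by
          simp only [List.length_cons]; omega,
        List.range_succ_eq_map, List.foldl_cons, List.foldl_map, pvBodyN_shift a b as bs]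
      have h0 : pvBodyN (a :: as) (b :: bs) st 0 = pvStep (pvStep st a) b := by simp [pvBodyN]
      rw [h0, ihn]
      simp [pvFlat]

-- A's Int-indexed range loop is pvBodyN over List.range
theorem pvA_eq (ns os : List String) (st : List String × PySem.Set String) :
    pvLoopA ns os st
      = (List.range (max ns.length os.length)).foldl (pvBodyN ns os) st := by
  unfold pvLoopA
  rw [PySem.List.pyRange_one]
  rw [show ((max (ns.length : Int) (os.length : Int) - 0).toNat) = max ns.length os.length by
    omega]
  rw [List.foldl_map]
  congr 1
  funext st' k
  simp [pvBodyN]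

-- combine_section_py IS join of pvLoopA's first component (definitional)
theorem pvA_unfold (n o : String) :
    combine_section_py n o
      = PySem.Str.join "\n" (pvLoopA (pvStripLinesA n) (pvStripLinesA o) ([], PySem.Set.empty)).1 :=
  rfl

-- the build fold over the raw split lines, characterised by the clean lines
theorem pvBuild_go (offset : Int) (raws : List String) (i : Int) (acc : List (Int × String)) :
    raws.foldl (pvBuildStep offset) (i, acc)
      = (i + ((raws.map PySem.Str.strip).filter (fun l => l ≠ "")).length,
         acc ++ pvTagFrom offset i ((raws.map PySem.Str.strip).filter (fun l => l ≠ ""))) := by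
  induction raws generalizing i acc with
  | nil => simp [pvTagFrom]
  | cons r rs ih =>
    rw [List.foldl_cons]
    by_cases h : PySem.Str.strip r = ""
    · rw [show pvBuildStep offset (i, acc) r = (i, acc) by simp [pvBuildStep, h]]
      simp [h, ih]
    · by_cases hl : (10:Nat) < (PySem.Chars.strip r.toList).length
      · rw [show pvBuildStep offset (i, acc) r
            = (i + 1, acc ++ [(2 * i + offset, PySem.Str.strip r)]) by
          simp [pvBuildStep, h, hl]]
        rw [ih]
        simp [h, hl, pvTagFrom, List.append_assoc]
        omega
      · rw [show pvBuildStep offset (i, acc) r = (i + 1, acc) by simp [pvBuildStep, h, hl]]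
        rw [ih]
        simp [h, hl, pvTagFrom]
        omega

theorem pvBuild_eq (offset : Int) (s : String) :
    pvBuildKeyed offset s = pvTagFrom offset 0 (pvStripLinesA s) := by
  unfold pvBuildKeyed pvStripLinesA
  rw [pvBuild_go]
  simp

-- a member of an if-then-singleton is that element
theorem pvMemIte {c : Prop} [Decidable c] {p t : Int × String}
    (ht : t ∈ (if c then [p] else ([] : List (Int × String)))) : t = p := by
  split at ht
  · simpa using ht
  · simp at ht

theorem pvInter_lb (ns os : List String) (i : Int) :
    ∀ t ∈ pvInter ns os i, 2 * i ≤ t.1 := by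
  induction ns generalizing os i with
  | nil =>
    induction os generalizing i with
    | nil => intro t ht; simp [pvInter] at ht
    | cons b bs ih =>
      intro t ht
      simp only [pvInter, List.mem_append] at ht
      rcases ht with ht | ht
      · obtain rfl := pvMemIte ht; omega
      · have := ih (i + 1) t ht; omega
  | cons a as ihn =>
    cases os with
    | nil =>
      intro t ht
      simp only [pvInter, List.mem_append] at ht
      rcases ht with ht | ht
      · obtain rfl := pvMemIte ht; omega
      · have := ihn [] (i + 1) t ht; omega
    | cons b bs =>
      intro t ht
      simp only [pvInter, List.mem_append] at ht
      rcases ht with (ht | ht) | ht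
      · obtain rfl := pvMemIte ht; omega
      · obtain rfl := pvMemIte ht; omega
      · have := ihn bs (i + 1) t ht; omega

theorem pvInter_pairwise (ns os : List String) (i : Int) :
    (pvInter ns os i).Pairwise (fun a b => a.1 < b.1) := by
  induction ns generalizing os i with
  | nil =>
    induction os generalizing i with
    | nil => simp [pvInter]
    | cons b bs ih =>
      rw [pvInter, List.pairwise_append]
      refine ⟨by split <;> simp, ih (i + 1), ?_⟩
      intro t ht u hu
      have hu' := pvInter_lb [] bs (i + 1) u hu
      obtain rfl := pvMemIte ht; omega
  | cons a as ihn =>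
    cases os with
    | nil =>
      rw [pvInter, List.pairwise_append]
      refine ⟨by split <;> simp, ihn [] (i + 1), ?_⟩
      intro t ht u hu
      have hu' := pvInter_lb as [] (i + 1) u hu
      obtain rfl := pvMemIte ht; omega
    | cons b bs =>
      rw [pvInter, List.pairwise_append]
      refine ⟨?_, ihn bs (i + 1), ?_⟩
      · rw [List.pairwise_append]
        refine ⟨by split <;> simp, by split <;> simp, ?_⟩
        intro t ht u hu
        obtain rfl := pvMemIte ht
        obtain rfl := pvMemIte hu
        omega
      · intro t ht u hu
        have hu' := pvInter_lb as bs (i + 1) u hu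
        rw [List.mem_append] at ht
        rcases ht with ht | ht <;> (obtain rfl := pvMemIte ht; omega)

theorem pvPermShuffle (X Y A B : List (Int × String)) :
    ((X ++ Y) ++ (A ++ B)).Perm ((X ++ A) ++ (Y ++ B)) := by
  have h : ((Y ++ A) ++ B).Perm ((A ++ Y) ++ B) := List.perm_append_comm.append_right B
  have h2 := h.append_left X
  simpa [List.append_assoc] using h2

theorem pvInter_perm (ns os : List String) (i : Int) :
    (pvInter ns os i).Perm (pvTagFrom 0 i ns ++ pvTagFrom 1 i os) := by
  induction ns generalizing os i with
  | nil =>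
    induction os generalizing i with
    | nil => simp [pvInter, pvTagFrom]
    | cons b bs ih =>
      simp only [pvInter, pvTagFrom, List.nil_append]
      exact (ih (i + 1)).append_left _
  | cons a as ihn =>
    cases os with
    | nil =>
      simp only [pvInter, pvTagFrom, List.append_nil, add_zero]
      have h := ihn [] (i + 1)
      simp only [pvTagFrom, List.append_nil] at h
      exact h.append_left _
    | cons b bs =>
      simp only [pvInter, pvTagFrom, add_zero]
      refine ((ihn bs (i + 1)).append_left _).trans ?_
      exact pvPermShuffle _ _ _ _

-- hence the sorted concatenation IS the interleaving
theorem pvSorted_eq (ns os : List String) :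
    PySem.List.sorted (pvTagFrom 0 0 ns ++ pvTagFrom 1 0 os)
        (fun t : Int × String => t.1) false = pvInter ns os 0 :=
  PySem.List.sorted_eq_of_perm_of_pairwise_lt _ _ (fun t : Int × String => t.1)
    (pvInter_perm ns os 0) (pvInter_pairwise ns os 0)

-- the lines of the interleaving are the long lines of pvFlat, in order
theorem pvInter_map_snd (ns os : List String) (i : Int) :
    (pvInter ns os i).map Prod.snd = (pvFlat ns os).filter (fun l => PySem.Str.len l > 10) := by
  induction ns generalizing os i with
  | nil =>
    induction os generalizing i with
    | nil => simp [pvInter, pvFlat]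
    | cons b bs ih =>
      by_cases hb : (10:Nat) < b.length <;>
        simp [pvInter, pvFlat, hb, ih (i + 1)]
  | cons a as ihn =>
    cases os with
    | nil =>
      by_cases ha : (10:Nat) < a.length <;>
        simp [pvInter, pvFlat, ha, ihn [] (i + 1)]
    | cons b bs =>
      by_cases ha : (10:Nat) < a.length <;> by_cases hb : (10:Nat) < b.length <;>
        simp [pvInter, pvFlat, ha, hb, ihn bs (i + 1)]

-- pvStep skips short lines, so A's fold equals the seen-only fold over the long-line filter
theorem pvFold_filter (l : List String) (st : List String × PySem.Set String) :
    l.foldl pvStep st = (l.filter (fun x => PySem.Str.len x > 10)).foldl pvSeen st := by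
  induction l generalizing st with
  | nil => rfl
  | cons x xs ih =>
    rw [List.foldl_cons, List.filter_cons]
    by_cases hx : (10:Nat) < x.length
    · have hs : pvStep st x = pvSeen st x := by
        unfold pvStep pvSeen
        refine if_congr ?_ rfl rfl
        simp [PySem.Str.len, hx]
      simp [PySem.Str.len, hx, hs, List.foldl_cons, ih]
    · have hs : pvStep st x = st := by
        unfold pvStep
        rw [if_neg]
        intro hc
        exact hx (by simpa [PySem.Str.len] using hc.2)
      simp [PySem.Str.len, hx, hs, ih]

-- combine_section_py_alt IS join of the pvSeen fold over the sorted keyed list's lines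
theorem pvB_unfold (n o : String) :
    combine_section_py_alt n o
      = PySem.Str.join "\n"
          (((PySem.List.sorted (pvBuildKeyed 0 n ++ pvBuildKeyed 1 o)
              (fun t : Int × String => t.1) false).map Prod.snd).foldl pvSeen
            ([], PySem.Set.empty)).1 := by
  unfold combine_section_py_alt
  rw [List.foldl_map]
  rfl

-- ===== VERDICT (by name: the statement is the Claim_ definition above) =====
theorem combine_section_py_spec : Claim_equal_combine_section_py := by
  intro n o _
  show combine_section_py n o = combine_section_py_alt n o
  rw [pvA_unfold, pvB_unfold, pvA_eq, pvKey, pvBuild_eq, pvBuild_eq, pvSorted_eq,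
    pvInter_map_snd, pvFold_filter]
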